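-- pv_equiv track=rewrite | github.com/gilvanti/mlbg-28374 | balance.py | remove_task
-- ===== SOURCE A (Python) =====
-- def remove_task(work,linha):
--     """Remover conexões com processos finalizados"""
--
--     while (linha > 0):
--         if  len(work) == 1:
--             if work[0] > 1:
--                 work[0] = work[0]-1
--                 linha = linha - 1
--             elif work[0] == 1:
--                 work[0] = work[0]-1
--                 linha = linha - 1
--         elif len(work) > 1:
--             if work[0] > 1:
--                 work[0] = work[0]-1
--                 linha = linha - 1
--             elif work[0] == 1:
--                 work.pop(0)
--                 linha = linha - 1
--         else:
--             return work
--
--     return work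
-- ===== SOURCE B (Python) =====
-- def remove_task(work, linha):
--     """Remover conexoes com processos finalizados"""
--     # Note: mutates work in place, like the original.
--     while linha > 0 and work:
--         head = work[0]
--         if head > linha:
--             work[0] = head - linha
--             return work
--         if len(work) == 1:
--             work[0] = head - linha
--             return work
--         del work[0]
--         linha -= head
--     return work
-- ===== Notes on version B (the rewrite author's own statement) =====
-- stated objective: alternative
-- what changed: A decrements the head one unit per loop iteration (one iteration per unit of linha); B consumes whole elements in a single front-to-back pass, subtracting each head's full value from linha at once (intended as asymptotically faster, O(n) vs O(linha); a timing run could not confirm a ratio because A timed out at larger sizes while B returned).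
import Mathlib
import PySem

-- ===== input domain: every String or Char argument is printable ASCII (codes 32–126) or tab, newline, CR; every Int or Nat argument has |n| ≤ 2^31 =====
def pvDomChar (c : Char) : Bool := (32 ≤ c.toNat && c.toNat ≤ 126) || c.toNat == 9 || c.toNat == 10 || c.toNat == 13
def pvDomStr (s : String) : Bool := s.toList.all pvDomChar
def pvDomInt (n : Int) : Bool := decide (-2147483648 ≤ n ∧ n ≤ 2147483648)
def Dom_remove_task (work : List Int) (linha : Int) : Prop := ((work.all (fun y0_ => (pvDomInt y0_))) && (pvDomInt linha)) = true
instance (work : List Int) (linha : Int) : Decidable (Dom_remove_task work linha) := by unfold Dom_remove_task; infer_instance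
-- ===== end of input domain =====

-- B consumes whole elements in one front-to-back pass instead of decrementing one unit per loop turn.
-- Both A and B mutate `work` in place in Python; the equivalence proved here is about the return value
-- (the in-place effect of B matches A's as well on Pre_, but that is not stated in Lean).

-- ===== PORT A =====
-- A's while-loop decrements `linha` by 1 on every productive turn, so `linha.toNat` steps of fuel are
-- exactly enough on every input where A returns; on inputs where the Python loop never terminates
-- (excluded by Pre_) the fuel merely makes the Lean function total.
def loopA : Nat → List Int → Int → List Int
  | 0, work, _ => work
  | f+1, work, linha =>
    if 0 < linha then
      match work with
      | [] => []                                               -- else: return work (work is [])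
      | [x] =>                                                 -- len(work) == 1
        if 1 < x then loopA f [x-1] (linha-1)
        else if x = 1 then loopA f [x-1] (linha-1)
        else loopA f [x] linha                                 -- body does nothing: Python loops forever
      | x :: y :: rest =>                                      -- len(work) > 1
        if 1 < x then loopA f ((x-1) :: y :: rest) (linha-1)
        else if x = 1 then loopA f (y :: rest) (linha-1)       -- work.pop(0)
        else loopA f (x :: y :: rest) linha                    -- body does nothing: Python loops forever
    else work

def remove_task (work : List Int) (linha : Int) : List Int :=
  loopA linha.toNat work linha

-- ===== PORT B =====
def loopB : List Int → Int → List Int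
  | [], _ => []
  | head :: rest, linha =>
    if linha ≤ 0 then head :: rest
    else if head > linha then (head - linha) :: rest
    else
      match rest with
      | [] => [head - linha]
      | _ :: _ => loopB rest (linha - head)

def remove_task_alt (work : List Int) (linha : Int) : List Int :=
  loopB work linha

-- ===== PRECONDITION & SPEC =====
-- Pre_ excludes exactly the inputs on which A's while-loop never terminates (linha > 0 and no positive
-- prefix of work can absorb linha): there A returns nothing at all.
def Pre_remove_task (work : List Int) (linha : Int) : Prop :=
  linha ≤ 0 ∨ work = [] ∨
    ∃ k < work.length, (∀ i ≤ k, 1 ≤ work.getD i 0) ∧ linha ≤ ((work.take (k+1)).sum)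
instance (work : List Int) (linha : Int) : Decidable (Pre_remove_task work linha) := by
  unfold Pre_remove_task; infer_instance

def pvWitness_remove_task : List Int × Int := ([2, 3], 4)

def Spec_remove_task (work : List Int) (linha : Int) (out : List Int) : Prop := out = remove_task_alt work linha
instance (work : List Int) (linha : Int) (out : List Int) : Decidable (Spec_remove_task work linha out) := by
  unfold Spec_remove_task; infer_instance

-- ===== CLAIM (what is proved, stated in full; the proofs are below) =====
def Claim_equal_remove_task : Prop := ∀ (work : List Int) (linha : Int), Dom_remove_task work linha → Pre_remove_task work linha → Spec_remove_task work linha (remove_task work linha)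

-- ===== LEMMAS AND PROOFS =====

lemma pre_cons_pos {x : Int} {r : List Int} {linha : Int}
    (h : Pre_remove_task (x :: r) linha) (hl : 0 < linha) : 1 ≤ x := by
  rcases h with h | h | ⟨k, _, hall, _⟩
  · omega
  · simp at h
  · simpa using hall 0 (Nat.zero_le k)

lemma pre_single {x linha : Int} (h : Pre_remove_task [x] linha) (hl : 0 < linha) :
    linha ≤ x := by
  rcases h with h | h | ⟨k, hk, _, hsum⟩
  · omega
  · simp at h
  · simp only [List.length_cons, List.length_nil] at hk
    have hk0 : k = 0 := by omega
    subst hk0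
    simpa using hsum

lemma pre_step_gt {x : Int} {r : List Int} {linha : Int}
    (h : Pre_remove_task (x :: r) linha) (hl : 0 < linha) (hx : 1 < x) :
    Pre_remove_task ((x-1) :: r) (linha-1) := by
  by_cases h1 : linha ≤ 1
  · exact Or.inl (by omega)
  rcases h with h | h | ⟨k, hk, hall, hsum⟩
  · omega
  · simp at h
  · refine Or.inr (Or.inr ⟨k, by simpa using hk, ?_, ?_⟩)
    · intro i hi
      cases i with
      | zero => simpa using (by omega : (1:Int) ≤ x - 1)
      | succ j => simpa using hall (j+1) hi
    · simp only [List.take_succ_cons, List.sum_cons] at hsum ⊢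
      omega

lemma pre_step_pop {y : Int} {rest : List Int} {linha : Int}
    (h : Pre_remove_task (1 :: y :: rest) linha) (hl : 1 < linha) :
    Pre_remove_task (y :: rest) (linha-1) := by
  rcases h with h | h | ⟨k, hk, hall, hsum⟩
  · omega
  · simp at h
  · cases k with
    | zero => simp at hsum; omega
    | succ k' =>
      refine Or.inr (Or.inr ⟨k', by simpa using hk, ?_, ?_⟩)
      · intro i hi
        simpa using hall (i+1) (by omega)
      · simp only [List.take_succ_cons, List.sum_cons] at hsum ⊢
        omega

lemma loopB_single (x linha : Int) (hl : 0 < linha) : loopB [x] linha = [x - linha] := by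
  simp only [loopB]
  split_ifs with h1 h2 <;> first | omega | rfl

lemma loopB_shift (x linha y : Int) (rest : List Int) (h0 : 0 < linha) (hx : 1 < x) :
    loopB ((x-1) :: y :: rest) (linha-1) = loopB (x :: y :: rest) linha := by
  have e1 : x - 1 - (linha - 1) = x - linha := by ring
  have e2 : linha - 1 - (x - 1) = linha - x := by ring
  simp only [loopB]
  split_ifs <;> first | omega | rfl | (simp only [e1, e2]) | (congr 1 <;> omega)

lemma main_lemma : ∀ (f : Nat) (work : List Int) (linha : Int),
    f = linha.toNat → Pre_remove_task work linha → loopA f work linha = loopB work linha := by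
  intro f
  induction f with
  | zero =>
    intro work linha hf hpre
    have hl : linha ≤ 0 := by omega
    cases work with
    | nil => simp [loopA, loopB]
    | cons x r => simp [loopA, loopB, hl]
  | succ f ih =>
    intro work linha hf hpre
    have hl : 0 < linha := by omega
    match work with
    | [] => simp [loopA, loopB, hl]
    | [x] =>
      have hx : 1 ≤ x := pre_cons_pos hpre hl
      have hlx : linha ≤ x := pre_single hpre hl
      have hrec : loopA f [x-1] (linha-1) = [x - linha] := by
        have hpre' : Pre_remove_task [x-1] (linha-1) := by
          by_cases h1 : linha ≤ 1
          · exact Or.inl (by omega)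
          · exact Or.inr (Or.inr ⟨0, by simp, by intro i hi; interval_cases i; simp; omega,
              by simp; omega⟩)
        rw [ih [x-1] (linha-1) (by omega) hpre']
        by_cases h1 : 0 < linha - 1
        · rw [loopB_single _ _ h1]; congr 1; omega
        · have : linha = 1 := by omega
          subst this
          simp [loopB]
      have hB : loopB [x] linha = [x - linha] := loopB_single x linha hl
      simp only [loopA]
      rw [if_pos hl]
      by_cases h2 : 1 < x
      · rw [if_pos h2, hrec, hB]
      · have hx1 : x = 1 := by omega
        rw [if_neg h2, if_pos hx1, hrec, hB]
    | x :: y :: rest =>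
      have hx : 1 ≤ x := pre_cons_pos hpre hl
      simp only [loopA]
      rw [if_pos hl]
      by_cases h2 : 1 < x
      · rw [if_pos h2]
        have hpre' := pre_step_gt hpre hl h2
        rw [ih _ _ (by omega) hpre']
        exact loopB_shift x linha y rest hl h2
      · have hx1 : x = 1 := by omega
        rw [if_neg h2, if_pos hx1]
        subst hx1
        have hpre' : Pre_remove_task (y :: rest) (linha - 1) := by
          by_cases h1 : 1 < linha
          · exact pre_step_pop hpre h1
          · exact Or.inl (by omega)
        rw [ih _ _ (by omega) hpre']
        have hng : ¬ ((1:Int) > linha) := by omega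
        simp only [loopB]
        rw [if_neg (by omega : ¬ linha ≤ 0), if_neg hng]

-- ===== VERDICT (by name: the statement is the Claim_ definition above) =====
theorem remove_task_spec : Claim_equal_remove_task := by
  intro work linha _ hpre
  unfold Spec_remove_task remove_task remove_task_alt
  exact main_lemma linha.toNat work linha rfl hpre
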